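-- pv_equiv track=rewrite | github.com/Atticus-Bross/Labs | lab9.py | fuzzy_pick
-- ===== SOURCE A (Python) =====
-- def ngrams(word: str) -> list[str]:
--     """Returns a list of n-grams of word for all relevant n, in descending order of n."""
--     grams:list=[]
--     for length in range(len(word),0,-1):
--         for start in range(0,len(word)-length+1):
--             grams.append(word[start:start+length])
--     return grams
--
-- def fuzzy_pick(query: str, index: dict) -> dict[str,str]:
--     """Returns suggestions for valid options based on the query string.
--     Suggestions will take the form of a dictionary with suggestions as keys and longest matching ngram as the value"""
--     suggestions = {}
--     grams:list=ngrams(query)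
--     for gram in grams:
--         if gram in index.keys():
--             for match in index[gram]:
--                 if match not in suggestions.keys():
--                     suggestions[match]=gram
--     return suggestions
-- ===== SOURCE B (Python) =====
-- def fuzzy_pick(query: str, index: dict) -> dict[str, str]:
--     """Returns suggestions for valid options based on the query string.
--     Suggestions will take the form of a dictionary with suggestions as keys and longest matching ngram as the value"""
--     hits = [gram for gram in index if gram and gram in query]
--     hits.sort(key=lambda gram: (-len(gram), query.index(gram)))
--     suggestions = {}
--     for gram in hits:
--         for match in index[gram]:
--             suggestions.setdefault(match, gram)
--     return suggestions
-- ===== Notes on version B (the rewrite author's own statement) =====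
-- stated objective: faster
-- what changed: Instead of enumerating all O(n^2) ngrams of the query (descending length) and probing the index for each, B scans the index once, keeps the keys that are non-empty substrings of the query, sorts them by (-len, first-occurrence position) to recreate A's priority order, and fills the suggestion dict in that order.
import Mathlib
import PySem

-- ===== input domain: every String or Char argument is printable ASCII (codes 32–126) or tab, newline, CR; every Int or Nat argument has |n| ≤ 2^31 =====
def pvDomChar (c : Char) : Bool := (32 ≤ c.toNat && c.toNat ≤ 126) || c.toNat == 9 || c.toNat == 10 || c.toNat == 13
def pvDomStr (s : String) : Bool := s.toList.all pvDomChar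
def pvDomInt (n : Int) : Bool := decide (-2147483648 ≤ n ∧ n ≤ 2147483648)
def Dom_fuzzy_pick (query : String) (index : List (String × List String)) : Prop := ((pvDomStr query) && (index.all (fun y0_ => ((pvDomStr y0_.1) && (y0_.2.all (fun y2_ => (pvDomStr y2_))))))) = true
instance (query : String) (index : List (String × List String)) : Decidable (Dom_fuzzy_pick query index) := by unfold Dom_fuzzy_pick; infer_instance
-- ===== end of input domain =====

-- B replaces A's O(n^2) ngram enumeration by a single scan of the index keys
-- (keep the non-empty substrings of the query) followed by a sort on
-- (-length, first occurrence), which recreates A's priority order exactly (objective: faster).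

-- ===== PORT A =====
def ngrams (word : String) : List String :=
  List.foldl (fun grams length =>
      List.foldl (fun grams start =>
          grams ++ [PySem.Str.slice word (some start) (some (start + length))])
        grams (PySem.List.pyRange 0 (PySem.Str.len word - length + 1)))
    [] (PySem.List.pyRange (PySem.Str.len word) 0 (-1))

def fuzzy_pick (query : String) (index : List (String × List String)) : List (String × String) :=
  (List.foldl (fun suggestions gram =>
      if (PySem.Dict.mk index).contains gram then
        List.foldl (fun suggestions mtch =>
            if suggestions.contains mtch then suggestions else suggestions.insert mtch gram)
          suggestions ((PySem.Dict.mk index).getD gram [])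
      else suggestions)
    (PySem.Dict.empty) (ngrams query)).items

-- ===== PORT B =====
def fuzzy_pick_alt (query : String) (index : List (String × List String)) : List (String × String) :=
  let hits := List.filter (fun gram => !(gram == "") && PySem.Str.isIn gram query)
      (PySem.List.dedup (index.map Prod.fst))
  let sortedHits := PySem.List.sorted2 hits
      (fun gram => -(PySem.Str.len gram)) (fun gram => PySem.Str.find query gram)
  (List.foldl (fun suggestions gram =>
      List.foldl (fun suggestions mtch =>
          if suggestions.contains mtch then suggestions else suggestions.insert mtch gram)
        suggestions ((PySem.Dict.mk index).getD gram []))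
    (PySem.Dict.empty) sortedHits).items

-- ===== PRECONDITION & SPEC =====
def Spec_fuzzy_pick (query : String) (index : List (String × List String)) (out : List (String × String)) : Prop := out = fuzzy_pick_alt query index
instance (query : String) (index : List (String × List String)) (out : List (String × String)) : Decidable (Spec_fuzzy_pick query index out) := by unfold Spec_fuzzy_pick; infer_instance

-- ===== CLAIM (what is proved, stated in full; the proofs are below) =====
def Claim_equal_fuzzy_pick : Prop := ∀ (query : String) (index : List (String × List String)), Dom_fuzzy_pick query index → Spec_fuzzy_pick query index (fuzzy_pick query index)

-- ===== LEMMAS AND PROOFS =====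

-- keep only the FIRST occurrence of every element (order preserved)
def firstDedup {α : Type} [DecidableEq α] : List α → List α
  | [] => []
  | x :: xs => x :: firstDedup (xs.filter (fun y => y ≠ x))
termination_by l => l.length
decreasing_by simp_wf; exact le_trans (List.length_filter_le _ _) (by simp)

theorem firstDedup_nil {α : Type} [DecidableEq α] : firstDedup ([] : List α) = [] := by
  rw [firstDedup.eq_def]

theorem firstDedup_cons {α : Type} [DecidableEq α] (x : α) (xs : List α) :
    firstDedup (x :: xs) = x :: firstDedup (xs.filter (fun y => y ≠ x)) := by
  rw [firstDedup.eq_def]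

theorem firstDedup_ind {α : Type} [DecidableEq α] {motive : List α → Prop}
    (h0 : motive []) (h1 : ∀ x xs, motive (xs.filter (fun y => y ≠ x)) → motive (x :: xs)) :
    ∀ l, motive l := by
  have key : ∀ (n : ℕ) (l : List α), l.length ≤ n → motive l := by
    intro n
    induction n with
    | zero => intro l hl; rw [List.length_eq_zero_iff.mp (Nat.le_zero.mp hl)]; exact h0
    | succ n ih =>
        intro l hl
        cases l with
        | nil => exact h0
        | cons x xs =>
            apply h1
            apply ih
            exact le_trans (List.length_filter_le _ _) (by simpa using Nat.succ_le_succ_iff.mp hl)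
  intro l; exact key l.length l le_rfl

theorem mem_firstDedup {α : Type} [DecidableEq α] (l : List α) (a : α) :
    a ∈ firstDedup l ↔ a ∈ l := by
  induction l using firstDedup_ind with
  | h0 => simp [firstDedup_nil]
  | h1 x xs ih =>
      rw [firstDedup_cons]
      by_cases hax : a = x
      · simp [hax]
      · simp only [List.mem_cons, hax, false_or]
        rw [ih]
        simp [List.mem_filter, hax]

theorem nodup_firstDedup {α : Type} [DecidableEq α] (l : List α) : (firstDedup l).Nodup := by
  induction l using firstDedup_ind with
  | h0 => simp [firstDedup_nil]
  | h1 x xs ih =>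
      rw [firstDedup_cons]
      refine List.nodup_cons.mpr ⟨?_, ih⟩
      intro hx
      have := (mem_firstDedup _ _).mp hx
      simp [List.mem_filter] at this

theorem firstDedup_append {α : Type} [DecidableEq α] :
    ∀ (l1 l2 : List α), firstDedup (l1 ++ l2)
      = firstDedup l1 ++ firstDedup (l2.filter (fun y => y ∉ l1)) := by
  intro l1
  induction l1 using firstDedup_ind with
  | h0 => intro l2; simp [firstDedup_nil]
  | h1 x xs ih =>
      intro l2
      rw [List.cons_append, firstDedup_cons, List.filter_append, ih, firstDedup_cons]
      have hmerge : (l2.filter (fun y => y ≠ x)).filter (fun y => y ∉ xs.filter (fun y => y ≠ x))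
          = l2.filter (fun y => y ∉ x :: xs) := by
        rw [List.filter_filter]
        apply List.filter_congr
        intro a _
        by_cases hax : a = x
        · simp [hax]
        · by_cases haxs : a ∈ xs <;> simp [hax, haxs, List.mem_filter]
      rw [hmerge, List.cons_append]

theorem firstDedup_filter {α : Type} [DecidableEq α] (p : α → Bool) :
    ∀ (l : List α), firstDedup (l.filter p) = (firstDedup l).filter p := by
  intro l
  induction l using firstDedup_ind with
  | h0 => simp [firstDedup_nil]
  | h1 x xs ih =>
      by_cases hp : p x
      · rw [List.filter_cons_of_pos hp, firstDedup_cons, firstDedup_cons, List.filter_cons_of_pos hp]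
        have hcomm : (xs.filter p).filter (fun y => y ≠ x) = (xs.filter (fun y => y ≠ x)).filter p := by
          rw [List.filter_filter, List.filter_filter]
          apply List.filter_congr
          intro a _
          exact Bool.and_comm _ _
        rw [hcomm, ih]
      · rw [firstDedup_cons, List.filter_cons_of_neg hp, List.filter_cons_of_neg hp, ← ih]
        congr 1
        have : (xs.filter p).filter (fun y => y ≠ x) = xs.filter p := by
          apply List.filter_eq_self.mpr
          intro a ha
          have hpa := List.of_mem_filter ha
          have : a ≠ x := by
            intro h; rw [h] at hpa; exact hp hpa
          simp [this]
        rw [← this, List.filter_filter, List.filter_filter]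
        apply List.filter_congr
        intro a _
        exact Bool.and_comm _ _

theorem firstDedup_append_singleton {α : Type} [DecidableEq α] (l : List α) (y : α) :
    firstDedup (l ++ [y]) = if y ∈ l then firstDedup l else firstDedup l ++ [y] := by
  rw [firstDedup_append]
  by_cases hy : y ∈ l
  · rw [if_pos hy]
    have h1 : List.filter (fun y_1 => decide (y_1 ∉ l)) [y] = [] := by simp [hy]
    rw [h1, firstDedup_nil, List.append_nil]
  · rw [if_neg hy]
    have h1 : List.filter (fun y_1 => decide (y_1 ∉ l)) [y] = [y] := by simp [hy]
    rw [h1, firstDedup_cons]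
    simp [firstDedup_nil]

-- first occurrences in a list indexed by positions are ordered by their (position-valued) key
theorem firstDedup_map_range_pairwise {α : Type} [DecidableEq α] (f : ℕ → α) (key : α → ℕ) :
    ∀ (m : ℕ), (∀ s, s < m → key (f s) ≤ s ∧ f (key (f s)) = f s) →
    List.Pairwise (fun a b => key a < key b) (firstDedup ((List.range m).map f)) := by
  intro m
  induction m with
  | zero => intro _; simp [firstDedup]
  | succ m ih =>
      intro h
      rw [List.range_succ, List.map_append, List.map_singleton, firstDedup_append_singleton]
      have ih' := ih (fun s hs => h s (Nat.lt_succ_of_lt hs))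
      by_cases hmem : f m ∈ (List.range m).map f
      · simpa [hmem] using ih'
      · simp only [hmem, if_false]
        rw [List.pairwise_append]
        refine ⟨ih', List.pairwise_singleton _ _, ?_⟩
        intro a ha b hb
        have hb' : b = f m := by simpa using hb
        have ha' : a ∈ (List.range m).map f := (mem_firstDedup _ _).mp ha
        obtain ⟨s, hs, rfl⟩ := by simpa using ha'
        have hkm : key (f m) = m := by
          rcases h m (Nat.lt_succ_self m) with ⟨hle, heq⟩
          rcases Nat.lt_or_ge (key (f m)) m with hlt | hge
          · exfalso
            apply hmem
            rw [← heq]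
            exact List.mem_map_of_mem (List.mem_range.mpr hlt)
          · omega
        have := (h s (Nat.lt_succ_of_lt hs)).1
        subst hb'
        omega

-- ===== facts about ngrams =====

def gramAt (word : String) (s L : ℕ) : String :=
  PySem.Str.slice word (some (s : ℤ)) (some ((s : ℤ) + (L : ℤ)))

theorem toList_gramAt (word : String) (s L : ℕ) :
    (gramAt word s L).toList = (word.toList.drop s).take L := by
  rw [gramAt, PySem.Str.toList_slice, PySem.Chars.slice_eq_listSlice,
    PySem.List.slice_natCast_add]

theorem pyRange_down (m : ℕ) :
    PySem.List.pyRange (m : ℤ) 0 (-1) = (List.range m).map (fun k : ℕ => (m : ℤ) - (k : ℤ)) := by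
  rw [PySem.List.pyRange]
  rw [if_neg (by norm_num : ¬((-1 : ℤ) = 0))]
  rw [if_neg (by norm_num : ¬((0 : ℤ) < -1))]
  rcases Nat.eq_zero_or_pos m with hm | hm
  · subst hm; simp
  · rw [if_pos (by exact_mod_cast hm : (0 : ℤ) < (m : ℤ))]
    have h2 : ((m : ℤ) - 0 + -(-1) - 1) / -(-1) = (m : ℤ) := by norm_num
    rw [h2, Int.toNat_natCast]
    show List.map (fun k : ℕ => (m : ℤ) + -1 * (k : ℤ)) (List.range m) = _
    apply List.map_congr_left
    intro k _
    ring

theorem ngrams_eq (word : String) :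
    ngrams word = (List.range word.toList.length).flatMap
      (fun k => (List.range (k + 1)).map (fun s => gramAt word s (word.toList.length - k))) := by
  set n := word.toList.length with hn
  rw [ngrams, PySem.Str.len_eq, ← hn, pyRange_down]
  have houter := PySem.List.foldl_congr_mem
    (l := (List.range n).map (fun k : ℕ => (n : ℤ) - (k : ℤ)))
    (init := ([] : List String))
    (f := fun grams length =>
      List.foldl (fun grams start =>
          grams ++ [PySem.Str.slice word (some start) (some (start + length))])
        grams (PySem.List.pyRange 0 ((n : ℤ) - length + 1)))
    (g := fun (grams : List String) (length : ℤ) => grams ++ (PySem.List.pyRange 0 ((n : ℤ) - length + 1)).map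
      (fun start => PySem.Str.slice word (some start) (some (start + length))))
    (by intro acc x _; exact PySem.List.foldl_append_singleton_eq_map _ _ _)
  rw [houter]
  rw [PySem.List.foldl_append_eq_flatMap, List.nil_append, List.flatMap_map]
  apply List.flatMap_congr
  intro k hk
  have hk' : k < n := List.mem_range.mp hk
  have h1 : (n : ℤ) - ((n : ℤ) - (k : ℤ)) + 1 = ((k + 1 : ℕ) : ℤ) := by push_cast; ring
  rw [h1, PySem.List.pyRange_zero_natCast, List.map_map]
  apply List.map_congr_left
  intro s _
  show PySem.Str.slice word (some (s : ℤ)) (some ((s : ℤ) + ((n : ℤ) - (k : ℤ)))) = gramAt word s (n - k)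
  rw [gramAt]
  congr 2
  push_cast [Nat.cast_sub (Nat.le_of_lt hk')]
  ring

theorem length_gramAt (word : String) (s L : ℕ) (h : s + L ≤ word.toList.length) :
    (gramAt word s L).toList.length = L := by
  rw [toList_gramAt]
  simp only [List.length_take, List.length_drop]
  omega

theorem infix_gramAt (word : String) (s L : ℕ) : (gramAt word s L).toList <:+: word.toList := by
  rw [toList_gramAt]
  exact List.IsInfix.trans ((List.take_prefix _ _).isInfix) ((List.drop_suffix _ _).isInfix)

theorem prefix_gramAt (word : String) (s L : ℕ) :
    (gramAt word s L).toList <+: word.toList.drop s := by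
  rw [toList_gramAt]
  exact List.take_prefix _ _

theorem mem_ngrams (word : String) (g : String) :
    g ∈ ngrams word ↔ (g.toList ≠ [] ∧ g.toList <:+: word.toList) := by
  set n := word.toList.length with hn
  rw [ngrams_eq, List.mem_flatMap]
  constructor
  · rintro ⟨k, hk, hg⟩
    rw [List.mem_map] at hg
    obtain ⟨s, hs, rfl⟩ := hg
    rw [List.mem_range] at hk
    rw [List.mem_range] at hs
    have hlen : (gramAt word s (n - k)).toList.length = n - k :=
      length_gramAt word s (n - k) (by omega)
    refine ⟨?_, infix_gramAt word s (n - k)⟩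
    intro hnil
    rw [hnil] at hlen
    simp at hlen
    omega
  · rintro ⟨hne, hinf⟩
    obtain ⟨pre, suf, hq⟩ := hinf
    have hLn : pre.length + g.toList.length + suf.length = n := by
      have hlq := congrArg List.length hq
      simp only [List.length_append] at hlq
      rw [hn]
      omega
    have hL1 : 1 ≤ g.toList.length := by
      cases hgl : g.toList with
      | nil => exact absurd hgl hne
      | cons _ _ => simp
    refine ⟨n - g.toList.length, by rw [List.mem_range]; omega, ?_⟩
    rw [List.mem_map]
    refine ⟨pre.length, by rw [List.mem_range]; omega, ?_⟩
    have hnk : n - (n - g.toList.length) = g.toList.length := by omega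
    apply String.toList_inj.mp
    rw [toList_gramAt, hnk, ← hq]
    rw [List.append_assoc, List.drop_left, List.take_left]

theorem find_spec (q g : List Char) (h : g <:+: q) :
    0 ≤ PySem.Chars.find q g ∧ g <+: q.drop (PySem.Chars.find q g).toNat ∧
      ∀ i, i < (PySem.Chars.find q g).toNat → ¬ g <+: q.drop i := by
  have h0 : 0 ≤ PySem.Chars.find q g := (PySem.Chars.find_nonneg_iff q g).mpr h
  have hne : PySem.Chars.findFrom q g ((0 : ℕ) : ℤ) ≠ -1 := by
    rw [Nat.cast_zero, PySem.Chars.findFrom_zero]; omega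
  have hspec := PySem.Chars.findFrom_natCast_spec q g 0 (Nat.zero_le _) hne
  rw [Nat.cast_zero, PySem.Chars.findFrom_zero] at hspec
  exact ⟨h0, hspec.2.1, fun i hi => hspec.2.2 i (Nat.zero_le _) hi⟩

-- the (-length, first occurrence) sort key used by B, as a lexicographic value
def keyLex (query g : String) : Lex (ℤ × ℤ) := toLex (-(PySem.Str.len g), PySem.Str.find query g)

theorem gram_block_hyp (word : String) (k : ℕ) (hk : k < word.toList.length) :
    ∀ s, s < k + 1 →
      (PySem.Chars.find word.toList (gramAt word s (word.toList.length - k)).toList).toNat ≤ s ∧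
      gramAt word ((PySem.Chars.find word.toList (gramAt word s (word.toList.length - k)).toList).toNat)
          (word.toList.length - k)
        = gramAt word s (word.toList.length - k) := by
  set n := word.toList.length with hn
  intro s hs
  set g := gramAt word s (n - k) with hg
  set L := n - k with hL
  have hsL : s + L ≤ n := by omega
  have hglen : g.toList.length = L := length_gramAt word s L hsL
  have hinf : g.toList <:+: word.toList := infix_gramAt word s L
  have hpre : g.toList <+: word.toList.drop s := prefix_gramAt word s L
  obtain ⟨h0, hfpre, hfmin⟩ := find_spec word.toList g.toList hinf
  set j := (PySem.Chars.find word.toList g.toList).toNat with hj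
  have hjs : j ≤ s := by
    by_contra hc
    exact hfmin s (by omega) hpre
  refine ⟨hjs, ?_⟩
  apply String.toList_inj.mp
  rw [toList_gramAt]
  obtain ⟨t, ht⟩ := hfpre
  rw [← ht, ← hglen, List.take_left]

theorem mem_block (word : String) (k : ℕ) (a : String)
    (ha : a ∈ (List.range (k + 1)).map (fun s => gramAt word s (word.toList.length - k))) :
    ∃ s, s < k + 1 ∧ a = gramAt word s (word.toList.length - k) := by
  rw [List.mem_map] at ha
  obtain ⟨s, hs, rfl⟩ := ha
  exact ⟨s, List.mem_range.mp hs, rfl⟩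

theorem mem_block_length (word : String) (k : ℕ) (hk : k < word.toList.length) (a : String)
    (ha : a ∈ (List.range (k + 1)).map (fun s => gramAt word s (word.toList.length - k))) :
    a.toList.length = word.toList.length - k := by
  obtain ⟨s, hs, rfl⟩ := mem_block word k a ha
  exact length_gramAt word s _ (by omega)

theorem blocks_pairwise (word : String) :
    ∀ ks : List ℕ, (∀ k ∈ ks, k < word.toList.length) → List.Pairwise (· < ·) ks →
    List.Pairwise (fun a b => keyLex word a < keyLex word b)
      (firstDedup (ks.flatMap (fun k =>
        (List.range (k + 1)).map (fun s => gramAt word s (word.toList.length - k))))) := by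
  set n := word.toList.length with hn
  intro ks
  induction ks with
  | nil => intro _ _; simp [firstDedup_nil]
  | cons k ks ih =>
      intro hbound hsort
      have hk : k < n := hbound k (List.mem_cons_self)
      rw [List.flatMap_cons, firstDedup_append]
      have hkslt : ∀ k' ∈ ks, k < k' := fun k' hk' => (List.pairwise_cons.mp hsort).1 k' hk'
      have hdisj : (List.flatMap (fun k =>
          (List.range (k + 1)).map (fun s => gramAt word s (n - k))) ks).filter
            (fun y => y ∉ (List.range (k + 1)).map (fun s => gramAt word s (n - k)))
          = List.flatMap (fun k => (List.range (k + 1)).map (fun s => gramAt word s (n - k))) ks := by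
        apply List.filter_eq_self.mpr
        intro a ha
        rw [List.mem_flatMap] at ha
        obtain ⟨k', hk', ha⟩ := ha
        have hlen' : a.toList.length = n - k' := mem_block_length word k' (hbound k' (List.mem_cons_of_mem _ hk')) a ha
        simp only [decide_eq_true_eq]
        intro hmem
        have hlen : a.toList.length = n - k := mem_block_length word k hk a hmem
        have := hkslt k' hk'
        have := hbound k' (List.mem_cons_of_mem _ hk')
        omega
      rw [hdisj, List.pairwise_append]
      refine ⟨?_, ih (fun k' hk' => hbound k' (List.mem_cons_of_mem _ hk')) (List.pairwise_cons.mp hsort).2, ?_⟩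
      · -- inside one block: same length, strictly increasing first-occurrence position
        have hblock := firstDedup_map_range_pairwise (fun s => gramAt word s (n - k))
          (fun g => (PySem.Chars.find word.toList g.toList).toNat) (k + 1)
          (gram_block_hyp word k hk)
        refine List.Pairwise.imp_of_mem ?_ hblock
        intro a b ha hb hlt
        have ha' := (mem_firstDedup _ _).mp ha
        have hb' := (mem_firstDedup _ _).mp hb
        have hla : a.toList.length = n - k := mem_block_length word k hk a ha'
        have hlb : b.toList.length = n - k := mem_block_length word k hk b hb'
        obtain ⟨sa, _, rfl⟩ := mem_block word k a ha'
        obtain ⟨sb, _, rfl⟩ := mem_block word k b hb'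
        apply Prod.Lex.toLex_lt_toLex.mpr
        right
        constructor
        · rw [PySem.Str.len_eq, PySem.Str.len_eq, hla, hlb]
        · rw [PySem.Str.find_eq, PySem.Str.find_eq]
          simp only at hlt
          have hna : 0 ≤ PySem.Chars.find word.toList (gramAt word sa (word.toList.length - k)).toList :=
            (PySem.Chars.find_nonneg_iff _ _).mpr (infix_gramAt word sa (word.toList.length - k))
          have hnb : 0 ≤ PySem.Chars.find word.toList (gramAt word sb (word.toList.length - k)).toList :=
            (PySem.Chars.find_nonneg_iff _ _).mpr (infix_gramAt word sb (word.toList.length - k))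
          dsimp only
          omega
      · -- across blocks: strictly longer grams come first
        intro a ha b hb
        have ha' := (mem_firstDedup _ _).mp ha
        have hla : a.toList.length = n - k := mem_block_length word k hk a ha'
        have hb' := (mem_firstDedup _ _).mp hb
        rw [List.mem_flatMap] at hb'
        obtain ⟨k', hk', hbmem⟩ := hb'
        have hlb : b.toList.length = n - k' := mem_block_length word k' (hbound k' (List.mem_cons_of_mem _ hk')) b hbmem
        apply Prod.Lex.toLex_lt_toLex.mpr
        left
        rw [PySem.Str.len_eq, PySem.Str.len_eq, hla, hlb]
        have := hkslt k' hk'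
        have := hbound k' (List.mem_cons_of_mem _ hk')
        have h1 : n - k' < n - k := by omega
        push_cast
        omega

theorem ngrams_firstDedup_pairwise (word : String) :
    List.Pairwise (fun a b => keyLex word a < keyLex word b) (firstDedup (ngrams word)) := by
  rw [ngrams_eq]
  exact blocks_pairwise word (List.range word.toList.length)
    (fun k hk => List.mem_range.mp hk) List.pairwise_lt_range

-- one pass of the suggestion-filling inner loop
def pIns (gram : String) (d : PySem.Dict String String) (mtch : String) : PySem.Dict String String :=
  if d.contains mtch then d else d.insert mtch gram

-- processing one gram: insert all its matches that are not yet present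
def pStep (index : List (String × List String)) (d : PySem.Dict String String) (gram : String) :
    PySem.Dict String String :=
  List.foldl (pIns gram) d ((PySem.Dict.mk index).getD gram [])

theorem contains_pIns_mono (g : String) (d : PySem.Dict String String) (m m' : String)
    (h : d.contains m = true) : (pIns g d m').contains m = true := by
  rw [pIns]
  split
  · exact h
  · rw [PySem.Dict.contains_insert]
    simp [h]

theorem contains_foldl_pIns_mono (g : String) (ms : List String) :
    ∀ (d : PySem.Dict String String) (m : String), d.contains m = true →
      (List.foldl (pIns g) d ms).contains m = true := by
  induction ms with
  | nil => intro d m h; exact h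
  | cons x ms ih => intro d m h; exact ih _ m (contains_pIns_mono g d m x h)

theorem contains_foldl_pIns_all (g : String) (ms : List String) :
    ∀ (d : PySem.Dict String String) (m : String), m ∈ ms →
      (List.foldl (pIns g) d ms).contains m = true := by
  induction ms with
  | nil => intro d m h; exact absurd h (List.not_mem_nil)
  | cons x ms ih =>
      intro d m h
      rcases List.mem_cons.mp h with rfl | hm
      · rw [List.foldl_cons]
        apply contains_foldl_pIns_mono
        rw [pIns]
        split
        · assumption
        · rw [PySem.Dict.contains_insert]; simp
      · exact ih _ m hm

theorem foldl_pIns_noop (g : String) (ms : List String) :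
    ∀ (d : PySem.Dict String String), (∀ m ∈ ms, d.contains m = true) →
      List.foldl (pIns g) d ms = d := by
  induction ms with
  | nil => intro d _; rfl
  | cons x ms ih =>
      intro d h
      rw [List.foldl_cons]
      have hx : pIns g d x = d := by rw [pIns, if_pos (h x List.mem_cons_self)]
      rw [hx]
      exact ih d (fun m hm => h m (List.mem_cons_of_mem _ hm))

theorem foldl_pStep_skip (index : List (String × List String)) (g : String) :
    ∀ (l : List String) (d : PySem.Dict String String),
      (∀ m ∈ (PySem.Dict.mk index).getD g [], d.contains m = true) →
      List.foldl (pStep index) d l = List.foldl (pStep index) d (l.filter (fun y => y ≠ g)) := by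
  intro l
  induction l with
  | nil => intro d _; rfl
  | cons x xs ih =>
      intro d hd
      by_cases hxg : x = g
      · subst hxg
        rw [List.foldl_cons, List.filter_cons_of_neg (by simp)]
        rw [show pStep index d x = d from foldl_pIns_noop x _ d hd]
        exact ih d hd
      · rw [List.foldl_cons, List.filter_cons_of_pos (by simp [hxg]), List.foldl_cons]
        exact ih (pStep index d x) (fun m hm => contains_foldl_pIns_mono x _ d m (hd m hm))

theorem foldl_pStep_firstDedup (index : List (String × List String)) :
    ∀ (l : List String) (d : PySem.Dict String String),
      List.foldl (pStep index) d l = List.foldl (pStep index) d (firstDedup l) := by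
  intro l
  induction l using firstDedup_ind with
  | h0 => intro d; rw [firstDedup_nil]
  | h1 x xs ih =>
      intro d
      rw [firstDedup_cons, List.foldl_cons, List.foldl_cons]
      rw [foldl_pStep_skip index x xs (pStep index d x)
        (fun m hm => contains_foldl_pIns_all x _ d m hm)]
      exact ih (pStep index d x)

theorem sorted2_eq_sorted_lex {α : Type} (xs : List α) (k1 k2 : α → ℤ) :
    PySem.List.sorted2 xs k1 k2 = PySem.List.sorted xs (fun x => toLex (k1 x, k2 x)) := by
  rw [PySem.List.sorted2, PySem.List.sorted]
  have hcmp : (fun a b => decide (k1 a < k1 b) || (!decide (k1 b < k1 a) && decide (k2 a < k2 b)))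
      = (fun a b : α => decide (toLex (k1 a, k2 a) < toLex (k1 b, k2 b))) := by
    funext a b
    rw [show decide (toLex (k1 a, k2 a) < toLex (k1 b, k2 b))
        = decide (k1 a < k1 b ∨ (k1 a = k1 b ∧ k2 a < k2 b)) from
      decide_eq_decide.mpr Prod.Lex.toLex_lt_toLex]
    by_cases h1 : k1 a < k1 b <;> by_cases h1' : k1 b < k1 a <;> by_cases h2 : k2 a < k2 b <;>
      simp [h1, h1', h2] <;> omega
  simp only [if_neg (by simp : ¬(false = true)), hcmp]

theorem dict_contains_iff (index : List (String × List String)) (a : String) :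
    (PySem.Dict.mk index).contains a = true ↔ a ∈ index.map Prod.fst := by
  simp [PySem.Dict.contains, List.any_eq_true, List.mem_map]

theorem str_eq_empty_iff (a : String) : a = "" ↔ a.toList = [] := by
  constructor
  · rintro rfl; rfl
  · intro h; apply String.toList_inj.mp; rw [h]; rfl

theorem hits_sorted_eq (query : String) (index : List (String × List String)) :
    PySem.List.sorted2
      (List.filter (fun gram => !(gram == "") && PySem.Str.isIn gram query)
        (PySem.List.dedup (index.map Prod.fst)))
      (fun gram => -(PySem.Str.len gram)) (fun gram => PySem.Str.find query gram)
    = (firstDedup (ngrams query)).filter (fun g => (PySem.Dict.mk index).contains g) := by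
  rw [sorted2_eq_sorted_lex]
  apply PySem.List.sorted_eq_of_perm_of_pairwise_lt
  · apply (List.perm_ext_iff_of_nodup ((nodup_firstDedup _).filter _)
      ((PySem.List.nodup_dedup _).filter _)).mpr
    intro a
    rw [List.mem_filter, List.mem_filter, mem_firstDedup, mem_ngrams,
      PySem.List.mem_dedup, dict_contains_iff]
    constructor
    · rintro ⟨⟨hne, hinf⟩, hmem⟩
      refine ⟨hmem, ?_⟩
      have h1 : ¬(a == "") = true := by
        simp only [beq_iff_eq]
        intro h; exact hne ((str_eq_empty_iff a).mp h)
      have h2 : PySem.Chars.isIn a.toList query.toList = true := by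
        rw [← PySem.Str.isIn_eq]
        exact (PySem.Str.isIn_iff_infix a query).mpr hinf
      simp [h1, h2]
    · rintro ⟨hmem, hcond⟩
      simp only [Bool.and_eq_true, Bool.not_eq_true'] at hcond
      obtain ⟨h1, h2⟩ := hcond
      refine ⟨⟨?_, (PySem.Str.isIn_iff_infix a query).mp h2⟩, hmem⟩
      intro h
      rw [(str_eq_empty_iff a).mpr h] at h1
      simp at h1
  · exact List.Pairwise.sublist (List.filter_sublist) (ngrams_firstDedup_pairwise query)

theorem fuzzy_pick_spec : Claim_equal_fuzzy_pick := by
  intro query index _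
  show fuzzy_pick query index = fuzzy_pick_alt query index
  rw [fuzzy_pick, fuzzy_pick_alt]
  congr 1
  have h1 : List.foldl (pStep index) PySem.Dict.empty
        ((ngrams query).filter (fun gram => (PySem.Dict.mk index).contains gram))
      = List.foldl (pStep index) PySem.Dict.empty
        (firstDedup ((ngrams query).filter (fun gram => (PySem.Dict.mk index).contains gram))) :=
    foldl_pStep_firstDedup index _ _
  have h2 : firstDedup ((ngrams query).filter (fun gram => (PySem.Dict.mk index).contains gram))
      = (firstDedup (ngrams query)).filter (fun gram => (PySem.Dict.mk index).contains gram) :=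
    firstDedup_filter _ (ngrams query)
  have h3 := hits_sorted_eq query index
  exact (PySem.List.foldl_if_eq_foldl_filter
      (fun gram => (PySem.Dict.mk index).contains gram)
      (pStep index) (ngrams query) PySem.Dict.empty).trans
    (h1.trans (by rw [h2, ← h3]; rfl))
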